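-- pv_equiv track=rewrite | github.com/sd17spring/TextMining | texttmining.py | word_finder
-- ===== SOURCE A (Python) =====
-- def word_sectioning(s):
--     """ Takes a string of words returns the first word
--
--         s: a string
--         returns: the first word
--     >>> word_sectioning("I bat today")
--     'I'
--     >>> word_sectioning("I.ban")
--     'I'
--     """
--     for index in range(0,len(s)):
--         word_section = s[index]
--         if  word_section == ' ' or word_section == '.' or  word_section == ',' or  word_section == '?' or  word_section == '!' or  word_section == ';' or  word_section == ':':
-- #        if  word_section == ' ':
--             return s[:index]
--     return s
--
-- def word_finder(s):
--     """ Takes a string of words returns all of the words. Does not work if the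
--     sentence begings with a "stopper"
--
--         s: a string
--         returns: all of the word
--     >>> word_sectioning(".I ran back. to the bat.I")
--     'I', 'ran', 'back', 'to', 'the', 'bat', 'I'
--     """
--     index = 0
--     word_start_stop_list = []
--     s = ' ' + s
--     while index+1 < len(s):
--         if ((s[index] == ' ' or  s[index]== '.' or  s[index] == ',' or  s[index] == '?' or  s[index] == '!' or  s[index] == ';' or  s[index] == ':')
--         and (s[index+1] != ' ' and  s[index+1] != '.' and  s[index+1] != ',' and  s[index+1] != '?' and  s[index+1] != ' !' and  s[index+1] != ';' and s[index+1] != ':')):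
--             full_word = word_sectioning(s[index+1:])
--             word_start_stop_list.append(full_word)
--             index = index + len(full_word)
--         else:
--             index = index +1
--     #This words were take from the most common word list on Wikipedia
--     stopwords = ['a', 'the', 'its', 'over', 'also', 'be', '"', 'to', 'of', 'and', 'in']
--     stopwords += ['that', 'have', 'it', 'for', 'not', 'on', 'with', 'he', 'as', 'do', 'at']
--     stopwords += ['this', 'but', 'his', 'by', 'from', 'they', 'we', 'say', 'her', 'she']
--     stopwords += ['or', 'an', 'will', 'my', 'one', 'all', 'would', 'there', 'their', 'what']
--     stopwords += ['so', 'up', 'out', 'if', 'about', 'who', 'get', 'which', 'go', 'me', 'when']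
--     stopwords += ['make', 'can', 'like', 'time', 'just', 'him', 'know', 'take', 'people']
--     stopwords += ['And', 'are', 'said', 'had', 'says', 'you', 'was', 'I', 'is', 'The', 'were']
--     stopwords += ['has', 'any', 'very', 'am', 'our', 'But', '\r\n', '\r\nAnd', '*', '\r\n\r\n', '\r\nThe']
--     stopwords += ['[\r\n\r\n[Footnote', '\r\n\r\nHEG', '\r\n\r\nTHEU', '\r\n\r\nTRA',']\r\n\r\n[Footnote']
--
--     final_word_list = [word for word in word_start_stop_list if word not in stopwords]
--     return final_word_list
-- ===== SOURCE B (Python) =====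
-- # Single-pass scanner: accumulate word chars, emit at each delimiter; stopwords in a frozenset.
-- # O(n) instead of A's repeated suffix slicing; also terminates where A loops forever ('!' after a delimiter).
-- _STOPWORDS = frozenset(
--     ['a', 'the', 'its', 'over', 'also', 'be', '"', 'to', 'of', 'and', 'in',
--      'that', 'have', 'it', 'for', 'not', 'on', 'with', 'he', 'as', 'do', 'at',
--      'this', 'but', 'his', 'by', 'from', 'they', 'we', 'say', 'her', 'she',
--      'or', 'an', 'will', 'my', 'one', 'all', 'would', 'there', 'their', 'what',
--      'so', 'up', 'out', 'if', 'about', 'who', 'get', 'which', 'go', 'me', 'when',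
--      'make', 'can', 'like', 'time', 'just', 'him', 'know', 'take', 'people',
--      'And', 'are', 'said', 'had', 'says', 'you', 'was', 'I', 'is', 'The', 'were',
--      'has', 'any', 'very', 'am', 'our', 'But', '\r\n', '\r\nAnd', '*', '\r\n\r\n', '\r\nThe',
--      '[\r\n\r\n[Footnote', '\r\n\r\nHEG', '\r\n\r\nTHEU', '\r\n\r\nTRA', ']\r\n\r\n[Footnote'])
--
-- _DELIMS = frozenset(' .,?!;:')
--
--
-- def word_finder(s):
--     words = []
--     cur = []
--     for ch in s:
--         if ch in _DELIMS:
--             if cur: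
--                 w = ''.join(cur)
--                 if w not in _STOPWORDS:
--                     words.append(w)
--                 cur = []
--         else:
--             cur.append(ch)
--     if cur:
--         w = ''.join(cur)
--         if w not in _STOPWORDS:
--             words.append(w)
--     return words
-- ===== Notes on version B (the rewrite author's own statement) =====
-- stated objective: faster
-- what changed: Replaces the index-jumping while loop that re-slices the suffix and rescans it with word_sectioning for every word by a single left-to-right character scan accumulating the current word, with the stopword list turned into a frozenset checked at emission time; Pre_ excludes inputs where '!' immediately follows a delimiter (or starts the string), on which A loops forever because of its "!= ' !'" typo.
-- outside the precondition, e.g. on word_finder('!'): A does not finish within the time limit, B returns []; on word_finder("!= ' !'"): A does not finish within the time limit, B returns ['=', "'", "'"]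
import Mathlib
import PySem

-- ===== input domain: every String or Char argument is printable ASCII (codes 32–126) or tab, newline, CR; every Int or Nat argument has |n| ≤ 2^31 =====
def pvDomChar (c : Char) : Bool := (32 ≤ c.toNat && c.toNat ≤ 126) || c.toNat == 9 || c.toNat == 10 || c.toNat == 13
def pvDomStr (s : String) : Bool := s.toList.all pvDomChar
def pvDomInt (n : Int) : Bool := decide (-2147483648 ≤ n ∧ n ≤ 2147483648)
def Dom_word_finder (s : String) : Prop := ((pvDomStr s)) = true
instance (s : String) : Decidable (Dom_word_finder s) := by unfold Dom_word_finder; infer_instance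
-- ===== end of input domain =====

-- B replaces A's index-jumping loop (which re-slices and rescans the suffix for every word) by a
-- single left-to-right character scan with the stopwords in a set; measured faster only as reported
-- in a timing run. Pre_ excludes the inputs on which A never returns (infinite loop).

-- ===== PORT A =====
-- the seven "stopper" characters tested by A's chains of == comparisons
def pvIsStop (c : Char) : Bool :=
  c == ' ' || c == '.' || c == ',' || c == '?' || c == '!' || c == ';' || c == ':'

-- the second chain in A's while-condition: note Python's `s[index+1] != ' !'` compares a 1-char
-- string with the 2-char string ' !' and is therefore always True, so '!' is NOT excluded here.
def pvIsStartNext (c : Char) : Bool :=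
  c != ' ' && c != '.' && c != ',' && c != '?' && c != ';' && c != ':'

-- `for index in range(0, len(s)): if s[index] is a stopper: return s[:index]` / `return s`
def pvWordSectioningLoop (s : List Char) (index : Nat) : List Char :=
  if h : index < s.length then
    if pvIsStop s[index] then s.take index
    else pvWordSectioningLoop s (index + 1)
  else s
termination_by s.length - index

def pvWordSectioning (s : List Char) : List Char := pvWordSectioningLoop s 0

-- A's stopwords, built exactly as the Python list literal concatenation
def pvStopwords : List String :=
  ["a", "the", "its", "over", "also", "be", "\"", "to", "of", "and", "in",
   "that", "have", "it", "for", "not", "on", "with", "he", "as", "do", "at",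
   "this", "but", "his", "by", "from", "they", "we", "say", "her", "she",
   "or", "an", "will", "my", "one", "all", "would", "there", "their", "what",
   "so", "up", "out", "if", "about", "who", "get", "which", "go", "me", "when",
   "make", "can", "like", "time", "just", "him", "know", "take", "people",
   "And", "are", "said", "had", "says", "you", "was", "I", "is", "The", "were",
   "has", "any", "very", "am", "our", "But", "\r\n", "\r\nAnd", "*", "\r\n\r\n", "\r\nThe",
   "[\r\n\r\n[Footnote", "\r\n\r\nHEG", "\r\n\r\nTHEU", "\r\n\r\nTRA", "]\r\n\r\n[Footnote"]

-- A's while loop; Python's while can diverge (see Pre_), so the port carries fuel that is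
-- sufficient on every input Pre_ admits (index strictly increases there).
def pvWordFinderLoop (s : List Char) (index : Nat) (acc : List String) : Nat → List String
  | 0 => acc
  | fuel + 1 =>
    if h : index + 1 < s.length then
      if pvIsStop (s[index]'(by omega)) && pvIsStartNext s[index + 1] then
        let w := pvWordSectioning (s.drop (index + 1))
        pvWordFinderLoop s (index + w.length) (acc ++ [String.ofList w]) fuel
      else pvWordFinderLoop s (index + 1) acc fuel
    else acc

def word_finder (s : String) : List String :=
  let t := ' ' :: s.toList                            -- s = ' ' + s
  let words := pvWordFinderLoop t 0 [] t.length
  words.filter (fun w => !pvStopwords.contains w)     -- [word for word in … if word not in stopwords]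

-- ===== PORT B =====
-- frozenset(' .,?!;:') and frozenset([…stopwords…]) of Source B
def pvDelimSet : PySem.Set Char := PySem.Set.ofList [' ', '.', ',', '?', '!', ';', ':']
def pvStopSet : PySem.Set String := PySem.Set.ofList pvStopwords

-- `if w not in _STOPWORDS: words.append(w)` at a word boundary
def pvEmit (words : List String) (cur : List Char) : List String :=
  if pvStopSet.contains (String.ofList cur) then words else words ++ [String.ofList cur]

-- Source B's single for-loop over the characters, state (cur, words)
def pvAltLoop (l : List Char) (cur : List Char) (words : List String) : List String :=
  match l with
  | [] => if cur.isEmpty then words else pvEmit words cur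
  | c :: t =>
    if pvDelimSet.contains c then
      if cur.isEmpty then pvAltLoop t cur words
      else pvAltLoop t [] (pvEmit words cur)
    else pvAltLoop t (cur ++ [c]) words

def word_finder_alt (s : String) : List String := pvAltLoop s.toList [] []

-- ===== PRECONDITION & SPEC =====
-- Pre_ excludes exactly the inputs on which A loops forever and never returns: those where '!'
-- immediately follows one of the seven separator characters in ' ' + s (including s starting
-- with '!'), because A's `!= ' !'` typo lets word_sectioning return '' and the index stops advancing.
def pvNoBang : List Char → Bool
  | c :: d :: t => (!pvIsStop c || d != '!') && pvNoBang (d :: t)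
  | _ => true

def Pre_word_finder (s : String) : Prop := pvNoBang (' ' :: s.toList) = true
instance (s : String) : Decidable (Pre_word_finder s) := by unfold Pre_word_finder; infer_instance

def pvWitness_word_finder : String := "Go home, friend."

def Spec_word_finder (s : String) (out : List String) : Prop := out = word_finder_alt s
instance (s : String) (out : List String) : Decidable (Spec_word_finder s out) := by unfold Spec_word_finder; infer_instance

-- ===== CLAIM (what is proved, stated in full; the proofs are below) =====
def Claim_equal_word_finder : Prop := ∀ (s : String), Dom_word_finder s → Pre_word_finder s → Spec_word_finder s (word_finder s)

-- ===== LEMMAS AND PROOFS =====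

-- common specification: the maximal runs of non-stopper characters
def pvTokens : List Char → List (List Char)
  | [] => []
  | c :: t =>
    if pvIsStop c then pvTokens t
    else (c :: t.takeWhile (fun x => !pvIsStop x)) :: pvTokens (t.dropWhile (fun x => !pvIsStop x))
termination_by l => l.length
decreasing_by
  · simp
  · have := List.length_dropWhile_le (fun x => !pvIsStop x) t
    simp; omega

def pvFilt (ts : List (List Char)) : List String :=
  (ts.map String.ofList).filter (fun w => !pvStopwords.contains w)

set_option maxRecDepth 8192 in
theorem pvDelim_eq_isStop (c : Char) : pvDelimSet.contains c = pvIsStop c := by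
  rw [show pvDelimSet = [' ', '.', ',', '?', '!', ';', ':'] from by decide]
  rw [Bool.eq_iff_iff]
  simp [pvIsStop, PySem.Set.contains]
  tauto

set_option maxRecDepth 8192 in
theorem pvStopSet_contains (w : String) : pvStopSet.contains w = pvStopwords.contains w := by
  rw [show pvStopSet = pvStopwords from by decide]
  rfl

theorem pvIsStartNext_of_not_stop (c : Char) (h : pvIsStop c = false) : pvIsStartNext c = true := by
  simp [pvIsStop] at h
  simp [pvIsStartNext]
  tauto

theorem pvIsStartNext_false (c : Char) (h : pvIsStop c = true) (h2 : c ≠ '!') : pvIsStartNext c = false := by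
  simp [pvIsStop] at h
  simp [pvIsStartNext]
  tauto

theorem pvNoBang_get (l : List Char) (hl : pvNoBang l = true) (i : Nat) (h : i + 1 < l.length)
    (hs : pvIsStop (l[i]'(by omega)) = true) : l[i + 1] ≠ '!' := by
  induction l generalizing i with
  | nil => simp at h
  | cons c t ih =>
    cases t with
    | nil => simp at h
    | cons d t' =>
      simp only [pvNoBang, Bool.and_eq_true, Bool.or_eq_true, Bool.not_eq_eq_eq_not,
        Bool.not_true, bne_iff_ne] at hl
      cases i with
      | zero =>
        simp only [List.getElem_cons_zero] at hs
        simp only [List.getElem_cons_succ, List.getElem_cons_zero]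
        rcases hl.1 with h1 | h1
        · rw [hs] at h1; cases h1
        · exact h1
      | succ j =>
        have := ih hl.2 j (by simpa using h) (by simpa using hs)
        simpa using this

theorem pvWordSectioningLoop_eq (s : List Char) (i : Nat) :
    pvWordSectioningLoop s i = s.take i ++ (s.drop i).takeWhile (fun x => !pvIsStop x) := by
  fun_induction pvWordSectioningLoop s i with
  | case1 i h hstop =>
    rw [← List.getElem_cons_drop h]
    simp [hstop]
  | case2 i h hstop ih =>
    rw [ih, ← List.getElem_cons_drop h,
      List.takeWhile_cons_of_pos (by simpa using hstop)]
    rw [show List.take (i + 1) s = List.take i s ++ [s[i]] from by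
      rw [List.take_add_one, List.getElem?_eq_getElem h]; rfl]
    rw [List.append_assoc]
    rfl
  | case3 i h =>
    rw [List.take_of_length_le (by omega), List.drop_eq_nil_of_le (by omega)]
    simp

theorem pvWordSectioning_eq (s : List Char) :
    pvWordSectioning s = s.takeWhile (fun x => !pvIsStop x) := by
  simpa using pvWordSectioningLoop_eq s 0

theorem pvFilt_cons (x : List Char) (ts : List (List Char)) :
    pvFilt (x :: ts) =
      (if pvStopwords.contains (String.ofList x) then [] else [String.ofList x]) ++ pvFilt ts := by
  simp only [pvFilt, List.map_cons, List.filter_cons]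
  split <;> simp_all

theorem pvEmit_eq (words : List String) (cur : List Char) :
    pvEmit words cur = words ++ pvFilt [cur] := by
  rw [pvEmit, pvStopSet_contains, pvFilt_cons]
  split <;> simp [pvFilt]

theorem pvAltLoop_eq (l : List Char) : ∀ (cur : List Char) (words : List String),
    pvAltLoop l cur words = words ++ pvFilt
      (if cur.isEmpty then pvTokens l
       else (cur ++ l.takeWhile (fun x => !pvIsStop x)) :: pvTokens (l.dropWhile (fun x => !pvIsStop x))) := by
  induction l with
  | nil =>
    intro cur words
    cases cur with
    | nil => simp [pvAltLoop, pvFilt, pvTokens]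
    | cons a as =>
      rw [pvAltLoop]
      simp only [List.isEmpty_cons, Bool.false_eq_true, if_false]
      rw [pvEmit_eq]
      simp [pvTokens]
  | cons c t ih =>
    intro cur words
    rw [pvAltLoop, pvDelim_eq_isStop]
    by_cases hc : pvIsStop c = true
    · simp only [hc, if_true]
      cases cur with
      | nil =>
        simp only [List.isEmpty_nil, if_true]
        rw [ih]
        simp [pvTokens, hc]
      | cons a as =>
        simp only [List.isEmpty_cons, Bool.false_eq_true, if_false]
        rw [ih, pvEmit_eq, pvFilt_cons]
        simp only [List.isEmpty_nil, if_true, List.takeWhile_cons, hc, Bool.not_true,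
          Bool.false_eq_true, if_false, List.append_nil, List.dropWhile_cons]
        rw [pvFilt_cons]
        have : pvTokens (c :: t) = pvTokens t := by rw [pvTokens, if_pos hc]
        simp [this, pvFilt, List.append_assoc]
    · simp only [Bool.not_eq_true] at hc
      simp only [hc, Bool.false_eq_true, if_false]
      rw [ih (cur ++ [c]) words]
      have h1 : (cur ++ [c]).isEmpty = false := by simp
      simp only [h1, Bool.false_eq_true, if_false]
      cases hcur : cur.isEmpty with
      | true =>
        have hnil : cur = [] := List.isEmpty_iff.mp hcur
        subst hnil
        have : pvTokens (c :: t) =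
            (c :: t.takeWhile (fun x => !pvIsStop x)) :: pvTokens (t.dropWhile (fun x => !pvIsStop x)) := by
          rw [pvTokens, if_neg (by simp [hc])]
        simp [this]
      | false =>
        simp [hc, List.append_assoc]

theorem pvALoop_delim (n : Nat) (s : List Char) (hnb : pvNoBang s = true) :
    ∀ (index : Nat) (acc : List String) (fuel : Nat) (hlt : index < s.length),
      pvIsStop (s[index]'hlt) = true →
      s.length - index ≤ fuel → s.length - index ≤ n →
      pvWordFinderLoop s index acc fuel = acc ++ (pvTokens (s.drop (index + 1))).map String.ofList := by
  induction n with
  | zero => intro index acc fuel hlt hs hf hn; omega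
  | succ n ih =>
    intro index acc fuel hlt hs hf hn
    obtain ⟨f, rfl⟩ : ∃ f, fuel = f + 1 := ⟨fuel - 1, by omega⟩
    by_cases h2 : index + 1 < s.length
    · by_cases hd : pvIsStop (s[index + 1]'h2) = true
      · -- next character is a stopper (and not '!', by Pre_): condition false, just step
        have hne : s[index + 1] ≠ '!' := pvNoBang_get s hnb index h2 hs
        have hfalse := pvIsStartNext_false _ hd hne
        rw [pvWordFinderLoop]
        simp only [h2, ↓reduceDIte, hfalse, Bool.and_false, Bool.false_eq_true, if_false]
        rw [ih (index + 1) acc f h2 hd (by omega) (by omega)]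
        rw [← List.getElem_cons_drop h2, pvTokens]
        simp [hd]
      · -- next character starts a word
        have hd' : pvIsStop (s[index + 1]'h2) = false := by simpa using hd
        have hstart := pvIsStartNext_of_not_stop _ hd'
        obtain ⟨u, hu⟩ : ∃ u, s.drop (index + 1) = u := ⟨_, rfl⟩
        obtain ⟨w, hwdef⟩ : ∃ w, u.takeWhile (fun x => !pvIsStop x) = w := ⟨_, rfl⟩
        have hdrop : u = s[index + 1] :: s.drop (index + 2) := by
          rw [← hu, ← List.getElem_cons_drop h2]
        have hlenu : u.length = s.length - (index + 1) := by rw [← hu]; simp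
        have hwexp : w = s[index + 1] :: (s.drop (index + 2)).takeWhile (fun x => !pvIsStop x) := by
          rw [← hwdef]
          conv_lhs => rw [hdrop]
          rw [List.takeWhile_cons_of_pos (by simp [hd'])]
        have hdwexp : u.dropWhile (fun x => !pvIsStop x) =
            (s.drop (index + 2)).dropWhile (fun x => !pvIsStop x) := by
          conv_lhs => rw [hdrop]
          rw [List.dropWhile_cons_of_pos (by simp [hd'])]
        have hwlen1 : 1 ≤ w.length := by rw [hwexp]; simp
        have hwlenle : w.length ≤ u.length := by
          rw [← hwdef]; exact (List.takeWhile_prefix _).length_le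
        have hlt2 : index + w.length < s.length := by omega
        -- the character at the new index is the last character of w, hence not a stopper
        have hs2 : pvIsStop (s[index + w.length]'hlt2) = false := by
          have hlw : w.length - 1 < (u.takeWhile (fun x => !pvIsStop x)).length := by
            rw [hwdef]; omega
          have hpw := List.mem_takeWhile_imp (List.getElem_mem hlw)
          rw [(List.takeWhile_prefix (p := fun x => !pvIsStop x) (l := u)).getElem hlw] at hpw
          have key : s[index + w.length]? = u[w.length - 1]? := by
            rw [← hu, List.getElem?_drop]
            congr 1
            omega
          rw [List.getElem?_eq_getElem hlt2, List.getElem?_eq_getElem (by omega)] at key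
          rw [Option.some.inj key]
          simpa using hpw
        -- after the word, the rest of the string is u.dropWhile (!pvIsStop ·)
        have hddw : s.drop (index + w.length + 1) = u.dropWhile (fun x => !pvIsStop x) := by
          have hstep : s.drop (index + w.length + 1) = List.drop w.length u := by
            rw [← hu, List.drop_drop]
            congr 1
            omega
          rw [hstep]
          conv_lhs => rw [← List.takeWhile_append_dropWhile (p := fun x => !pvIsStop x) (l := u),
            hwdef]
          rw [List.drop_left]
        -- first iteration: the condition is true, one word is appended
        rw [pvWordFinderLoop]
        simp only [h2, ↓reduceDIte, hs, hstart, Bool.and_self, if_true]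
        rw [pvWordSectioning_eq, hu, hwdef]
        -- the first token of u is w
        have htok : pvTokens u = w :: pvTokens (u.dropWhile (fun x => !pvIsStop x)) := by
          conv_lhs => rw [hdrop]
          rw [pvTokens, if_neg hd, hdwexp, ← hwexp]
        rw [htok]
        -- second iteration: the index sits on the last character of w, condition is false
        by_cases h3 : index + w.length + 1 < s.length
        · obtain ⟨f', rfl⟩ : ∃ f', f = f' + 1 := ⟨f - 1, by omega⟩
          rw [pvWordFinderLoop]
          simp only [h3, ↓reduceDIte, hs2, Bool.false_and, Bool.false_eq_true, if_false]
          have hcons : u.dropWhile (fun x => !pvIsStop x) =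
              s[index + w.length + 1]'h3 :: s.drop (index + w.length + 1 + 1) := by
            rw [← hddw, ← List.getElem_cons_drop h3]
          have hdwne : u.dropWhile (fun x => !pvIsStop x) ≠ [] := by
            rw [hcons]; exact List.cons_ne_nil _ _
          have hstop3 : pvIsStop (s[index + w.length + 1]'h3) = true := by
            have hhd := List.head_dropWhile_not (fun x => !pvIsStop x) hdwne
            have hh? : (u.dropWhile (fun x => !pvIsStop x)).head? =
                some (s[index + w.length + 1]'h3) := by rw [hcons]; rfl
            have hh := List.head?_eq_some_head (l := u.dropWhile (fun x => !pvIsStop x)) hdwne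
            rw [hh?] at hh
            rw [← Option.some.inj hh] at hhd
            simpa using hhd
          rw [ih (index + w.length + 1) (acc ++ [String.ofList w]) f' h3 hstop3 (by omega) (by omega)]
          rw [hcons, pvTokens, if_pos hstop3]
          simp
        · have hdw_nil : u.dropWhile (fun x => !pvIsStop x) = [] := by
            rw [← hddw]
            exact List.drop_eq_nil_of_le (by omega)
          rw [hdw_nil]
          cases f <;> (rw [pvWordFinderLoop]; simp [h3, pvTokens])
    · rw [pvWordFinderLoop]
      have hnil : s.drop (index + 1) = [] := List.drop_eq_nil_of_le (by omega)
      simp [h2, hnil, pvTokens]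

-- ===== VERDICT (by name: the statement is the Claim_ definition above) =====
theorem word_finder_spec : Claim_equal_word_finder := by
  intro s hdom hpre
  show word_finder s = word_finder_alt s
  simp only [word_finder, word_finder_alt]
  have h0 : 0 < (' ' :: s.toList).length := by simp
  rw [pvALoop_delim (' ' :: s.toList).length (' ' :: s.toList) hpre 0 [] (' ' :: s.toList).length h0
    (by simp [pvIsStop]) (by omega) (by omega)]
  rw [pvAltLoop_eq]
  simp [pvFilt]
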